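-- pv_equiv track=rewrite | github.com/ProfSandMan/icesrag | icesrag/retrieve/retrievers/chroma_bm25.py | reverse_rank_list
-- ===== SOURCE A (Python) =====
-- def reverse_rank_list(nums):
--     # Create a sorted version of the original list (descending order) along with the original indices
--     sorted_nums = sorted(enumerate(nums), key=lambda x: x[1], reverse=True)
--
--     # Create a list to hold the ranks
--     ranks = [0] * len(nums)
--
--     # Assign reverse ranks
--     current_rank = 1
--     for i in range(len(sorted_nums)):
--         # If it's not the first item and the current value is equal to the previous one,
--         # we assign it the same rank
--         if i > 0 and sorted_nums[i][1] == sorted_nums[i - 1][1]: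
--             ranks[sorted_nums[i][0]] = ranks[sorted_nums[i - 1][0]]
--         else:
--             ranks[sorted_nums[i][0]] = current_rank
--
--         current_rank += 1
--
--     return ranks
-- ===== SOURCE B (Python) =====
-- def reverse_rank_list(nums):
--     # competition rank: 1 + number of elements strictly greater
--     return [1 + sum(1 for y in nums if y > x) for x in nums]
-- ===== Notes on version B (the rewrite author's own statement) =====
-- stated objective: simpler
-- what changed: Replaces the sort-then-tie-copy pass with a direct per-element count: rank = 1 + number of strictly greater elements (competition ranking), a one-line comprehension with no sort, no index bookkeeping and no mutable ranks array.
import Mathlib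
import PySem

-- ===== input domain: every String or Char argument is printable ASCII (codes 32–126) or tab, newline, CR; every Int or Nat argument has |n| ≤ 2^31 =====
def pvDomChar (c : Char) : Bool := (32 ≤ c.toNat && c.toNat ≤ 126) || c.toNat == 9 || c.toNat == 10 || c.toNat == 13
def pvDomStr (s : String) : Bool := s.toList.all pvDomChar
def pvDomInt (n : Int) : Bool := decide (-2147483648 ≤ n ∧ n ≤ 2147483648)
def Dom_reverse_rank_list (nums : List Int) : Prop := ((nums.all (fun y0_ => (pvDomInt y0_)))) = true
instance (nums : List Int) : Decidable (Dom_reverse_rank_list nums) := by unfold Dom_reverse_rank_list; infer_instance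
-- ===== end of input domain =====

-- B replaces A's sort-and-tie-copy ranking by the direct competition-rank formula
-- rank(x) = 1 + #{y in nums | y > x}; a simpler one-pass-per-element re-implementation
-- with the same return value on every input.


-- ===== PORT A =====
-- sorted(enumerate(nums), key=lambda x: x[1], reverse=True); ranks = [0]*len(nums);
-- then for i in range(len): tie copies the previous entry's rank, else current_rank.
def reverse_rank_list (nums : List Int) : List Int :=
  let sorted_nums := PySem.List.sorted (PySem.List.enumerate nums) (fun x => x.2) true
  let ranks : List Int := List.replicate nums.length 0
  let st := (PySem.List.pyRange 0 (sorted_nums.length : Int) 1).foldl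
    (fun (st : List Int × Int) (i : Int) =>
      let si := PySem.List.pyGetD sorted_nums i ((0 : Int), (0 : Int))
      let sp := PySem.List.pyGetD sorted_nums (i - 1) ((0 : Int), (0 : Int))
      let r :=
        if 0 < i ∧ si.2 = sp.2 then
          PySem.List.pySetD st.1 si.1 (PySem.List.pyGetD st.1 sp.1 0)
        else
          PySem.List.pySetD st.1 si.1 st.2
      (r, st.2 + 1))
    (ranks, 1)
  st.1

-- ===== PORT B =====
-- [1 + sum(1 for y in nums if y > x) for x in nums]  (the 0/1-sum is a count)
def reverse_rank_list_alt (nums : List Int) : List Int :=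
  nums.map (fun x => 1 + (nums.countP (fun y => x < y) : Int))

-- ===== PRECONDITION & SPEC =====
def Spec_reverse_rank_list (nums : List Int) (out : List Int) : Prop := out = reverse_rank_list_alt nums
instance (nums : List Int) (out : List Int) : Decidable (Spec_reverse_rank_list nums out) := by unfold Spec_reverse_rank_list; infer_instance

-- ===== CLAIM (what is proved, stated in full; the proofs are below) =====
def Claim_equal_reverse_rank_list : Prop := ∀ (nums : List Int), Dom_reverse_rank_list nums → Spec_reverse_rank_list nums (reverse_rank_list nums)

-- ===== LEMMAS AND PROOFS =====
-- proof helpers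
def pvS (nums : List Int) : List (Int × Int) :=
  PySem.List.sorted (PySem.List.enumerate nums) (fun x => x.2) true

def pvV (nums : List Int) (i : Nat) : Int × Int :=
  PySem.List.pyGetD (pvS nums) (i : Int) ((0 : Int), (0 : Int))

def pvW (nums : List Int) : Nat → Int
  | 0 => 1
  | (i+1) => if (pvV nums (i+1)).2 = (pvV nums i).2 then pvW nums i else (i : Int) + 2

def pvF (nums : List Int) : List Int × Int → Int → List Int × Int := fun st i =>
  let si := PySem.List.pyGetD (pvS nums) i ((0 : Int), (0 : Int))
  let sp := PySem.List.pyGetD (pvS nums) (i - 1) ((0 : Int), (0 : Int))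
  let r :=
    if 0 < i ∧ si.2 = sp.2 then
      PySem.List.pySetD st.1 si.1 (PySem.List.pyGetD st.1 sp.1 0)
    else
      PySem.List.pySetD st.1 si.1 st.2
  (r, st.2 + 1)

lemma pvA_eq (nums : List Int) :
    reverse_rank_list nums =
      ((PySem.List.pyRange 0 ((pvS nums).length : Int) 1).foldl (pvF nums)
        (List.replicate nums.length 0, 1)).1 := rfl

lemma pvS_length (nums : List Int) : (pvS nums).length = nums.length := by
  simp [pvS, PySem.List.length_sorted, PySem.List.length_enumerate]

lemma pvS_perm (nums : List Int) : (pvS nums).Perm (PySem.List.enumerate nums) :=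
  PySem.List.sorted_perm _ _ _

lemma pvS_pairwise (nums : List Int) : (pvS nums).Pairwise (fun a b => b.2 ≤ a.2) :=
  PySem.List.sorted_pairwise_rev _ _

lemma pvV_eq (nums : List Int) (i : Nat) (h : i < nums.length) :
    pvV nums i = (pvS nums)[i]'(by rw [pvS_length]; exact h) := by
  simp [pvV, PySem.List.pyGetD_natCast, pvS_length, h]

lemma pvS_fst_nodup (nums : List Int) : ((pvS nums).map (·.1)).Nodup := by
  have h := (pvS_perm nums).map (·.1)
  rw [PySem.List.map_fst_enumerate] at h
  exact h.nodup_iff.mpr (PySem.List.nodup_pyRange_one _ _)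

-- indices map to distinct first components
lemma pvV_fst_ne (nums : List Int) (i j : Nat) (hi : i < nums.length)
    (hj : j < nums.length) (hne : i ≠ j) : (pvV nums i).1 ≠ (pvV nums j).1 := by
  rw [pvV_eq nums i hi, pvV_eq nums j hj]
  have hn := pvS_fst_nodup nums
  have hi' : i < ((pvS nums).map (·.1)).length := by simpa [pvS_length]
  have hj' : j < ((pvS nums).map (·.1)).length := by simpa [pvS_length]
  have := (List.Nodup.getElem_inj_iff hn (i := i) (j := j) (hi := hi') (hj := hj'))
  simp only [List.getElem_map] at this
  intro hEq
  exact hne (this.mp hEq)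

-- each sorted entry is (k, nums[k])
lemma pvV_spec (nums : List Int) (i : Nat) (h : i < nums.length) :
    ∃ (k : Nat) (hk : k < nums.length), pvV nums i = ((k : Int), nums[k]) := by
  have hmem : pvV nums i ∈ PySem.List.enumerate nums := by
    rw [pvV_eq nums i h]
    exact (pvS_perm nums).mem_iff.mp (List.getElem_mem _)
  rcases (PySem.List.mem_enumerate_iff _ _ _).mp hmem with ⟨k, hk, hEq⟩
  exact ⟨k, hk, by simpa using hEq⟩

-- values are nonincreasing along pvS
lemma pvV_snd_mono (nums : List Int) (i j : Nat) (hij : i ≤ j) (hj : j < nums.length) :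
    (pvV nums j).2 ≤ (pvV nums i).2 := by
  rcases eq_or_lt_of_le hij with rfl | hlt
  · exact le_refl _
  · have hp := (List.pairwise_iff_getElem).mp (pvS_pairwise nums)
    have hi' : i < (pvS nums).length := by rw [pvS_length]; omega
    have hj' : j < (pvS nums).length := by rw [pvS_length]; exact hj
    have := hp i j hi' hj' hlt
    rw [pvV_eq nums i (by omega), pvV_eq nums j hj]
    exact this

-- countP over nums equals countP over pvS of the snd-predicate
lemma pvCountP_eq (nums : List Int) (p : Int → Bool) :
    nums.countP p = (pvS nums).countP (fun q => p q.2) := by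
  have h1 := ((pvS_perm nums).countP_eq (fun q => p q.2)).symm
  have h2 : (PySem.List.enumerate nums).countP (fun q => p q.2)
      = ((PySem.List.enumerate nums).map (·.2)).countP p := by
    rw [List.countP_map]; rfl
  rw [PySem.List.map_snd_enumerate] at h2
  rw [h2] at h1
  exact h1

-- at a group start, the number of strictly greater elements equals the index
lemma pvCount_group_start (nums : List Int) (i : Nat) (hi : i < nums.length)
    (hstart : i = 0 ∨ (pvV nums i).2 ≠ (pvV nums (i-1)).2) :
    nums.countP (fun y => (pvV nums i).2 < y) = i := by
  rw [pvCountP_eq]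
  have hsl : (pvS nums).length = nums.length := pvS_length nums
  have hsplit : pvS nums = (pvS nums).take i ++ (pvS nums).drop i := (List.take_append_drop _ _).symm
  rw [hsplit, List.countP_append]
  have htake : ((pvS nums).take i).countP (fun q => decide ((pvV nums i).2 < q.2)) = i := by
    have hlen : ((pvS nums).take i).length = i := by
      rw [List.length_take]; omega
    rw [List.countP_eq_length.mpr, hlen]
    intro a ha
    rcases List.mem_take_iff_getElem.mp ha with ⟨j, hj, rfl⟩
    have hj' : j < i := by omega
    have hji : j < nums.length := by omega
    have h1 : (pvV nums i).2 < (pvV nums (i-1)).2 := by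
      rcases hstart with h0 | hne
      · omega
      · have hle : (pvV nums i).2 ≤ (pvV nums (i-1)).2 := pvV_snd_mono nums (i-1) i (by omega) hi
        exact lt_of_le_of_ne hle hne
    have h2 : (pvV nums (i-1)).2 ≤ (pvV nums j).2 := pvV_snd_mono nums j (i-1) (by omega) (by omega)
    have : (pvV nums i).2 < (pvV nums j).2 := lt_of_lt_of_le h1 h2
    rw [pvV_eq nums j hji] at this
    simpa using this
  have hdrop : ((pvS nums).drop i).countP (fun q => decide ((pvV nums i).2 < q.2)) = 0 := by
    rw [List.countP_eq_zero]
    intro a ha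
    rcases List.mem_drop_iff_getElem.mp ha with ⟨j, hj, rfl⟩
    have hij : i + j < nums.length := by omega
    have hle : (pvV nums (i+j)).2 ≤ (pvV nums i).2 := pvV_snd_mono nums i (i+j) (by omega) hij
    rw [pvV_eq nums (i+j) hij] at hle
    simp only [decide_eq_true_eq]
    intro hlt
    exact absurd hlt (not_lt.mpr hle)
  rw [htake, hdrop]
  omega

lemma pvW_target (nums : List Int) (i : Nat) (hi : i < nums.length) :
    pvW nums i = 1 + (nums.countP (fun y => (pvV nums i).2 < y) : Int) := by
  induction i with
  | zero =>
      rw [pvCount_group_start nums 0 hi (Or.inl rfl)]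
      simp [pvW]
  | succ m ih =>
      by_cases htie : (pvV nums (m+1)).2 = (pvV nums m).2
      · rw [show pvW nums (m+1) = pvW nums m from by simp [pvW, htie]]
        rw [ih (by omega)]
        rw [htie]
      · rw [show pvW nums (m+1) = (m : Int) + 2 from by simp [pvW, htie]]
        rw [pvCount_group_start nums (m+1) hi (Or.inr (by simpa using htie))]
        push_cast; ring


lemma pvRange_bridge (n : Nat) :
    PySem.List.pyRange 0 (n : Int) 1 = (List.range n).map (fun (k : Nat) => (k : Int)) := by
  rw [PySem.List.pyRange_one]
  simp only [Int.sub_zero, Int.toNat_natCast]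
  exact List.map_congr_left (fun k _ => by simp)

-- loop invariant: after k steps the counter is k+1 and every processed
-- position holds its pvW value
lemma pvLoop_inv (nums : List Int) (k : Nat) (hk : k ≤ nums.length) :
    ((List.range k).foldl (fun (st : List Int × Int) (j : Nat) => pvF nums st (j : Int))
        (List.replicate nums.length 0, 1)).2 = (k : Int) + 1 ∧
    ((List.range k).foldl (fun (st : List Int × Int) (j : Nat) => pvF nums st (j : Int))
        (List.replicate nums.length 0, 1)).1.length = nums.length ∧
    ∀ i < k, PySem.List.pyGetD
        ((List.range k).foldl (fun (st : List Int × Int) (j : Nat) => pvF nums st (j : Int))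
          (List.replicate nums.length 0, 1)).1 (pvV nums i).1 0 = pvW nums i := by
  induction k with
  | zero => simp
  | succ m ih =>
      obtain ⟨ihc, ihl, ihv⟩ := ih (by omega)
      rw [List.range_succ, List.foldl_append]
      set st := (List.range m).foldl (fun (st : List Int × Int) (j : Nat) => pvF nums st (j : Int))
        (List.replicate nums.length 0, 1) with hst
      have hm : m < nums.length := by omega
      obtain ⟨km, hkm, hvm⟩ := pvV_spec nums m hm
      have hwrite : pvF nums st (m : Int)
          = (PySem.List.pySetD st.1 (pvV nums m).1 (pvW nums m), st.2 + 1) := by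
        show (if 0 < (m : Int) ∧ (pvV nums m).2 = (PySem.List.pyGetD (pvS nums) ((m : Int) - 1) ((0:Int),(0:Int))).2
              then PySem.List.pySetD st.1 (pvV nums m).1
                (PySem.List.pyGetD st.1 (PySem.List.pyGetD (pvS nums) ((m : Int) - 1) ((0:Int),(0:Int))).1 0)
              else PySem.List.pySetD st.1 (pvV nums m).1 st.2, st.2 + 1) = _
        cases m with
        | zero =>
            rw [if_neg (by simp)]
            rw [ihc]
            simp [pvW]
        | succ m' =>
            have hsp : PySem.List.pyGetD (pvS nums) (((m'+1 : Nat) : Int) - 1) ((0:Int),(0:Int))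
                = pvV nums m' := by
              have : ((m'+1 : Nat) : Int) - 1 = ((m' : Nat) : Int) := by push_cast; ring
              rw [this]; rfl
            rw [hsp]
            by_cases htie : (pvV nums (m'+1)).2 = (pvV nums m').2
            · rw [if_pos ⟨by positivity, htie⟩]
              rw [ihv m' (by omega)]
              have : pvW nums (m'+1) = pvW nums m' := by simp [pvW, htie]
              rw [this]
            · rw [if_neg (by tauto)]
              rw [ihc]
              have : pvW nums (m'+1) = (m' : Int) + 2 := by simp [pvW, htie]
              rw [this]
              push_cast; ring_nf
      simp only [List.foldl_cons, List.foldl_nil]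
      rw [hwrite]
      refine ⟨by rw [ihc]; push_cast; ring, by simp [PySem.List.length_pySetD, ihl], ?_⟩
      intro i hi
      rcases Nat.lt_succ_iff_lt_or_eq.mp hi with hlt | rfl
      · -- earlier position untouched: distinct first components
        obtain ⟨ki, hki, hvi⟩ := pvV_spec nums i (by omega)
        have hne : (pvV nums i).1 ≠ (pvV nums m).1 := pvV_fst_ne nums i m (by omega) hm (by omega)
        rw [hvm, hvi] at hne ⊢
        simp only []
        rw [PySem.List.pyGetD_pySetD_natCast _ _ _ _ _ (by rw [ihl]; exact hkm)]
        rw [if_neg (by simpa using hne)]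
        have := ihv i hlt
        rw [hvi] at this
        exact this
      · rw [hvm]
        simp only []
        rw [PySem.List.pyGetD_pySetD_natCast _ _ _ _ _ (by rw [ihl]; exact hkm)]
        rw [if_pos rfl]

lemma pvMain (nums : List Int) : reverse_rank_list nums = reverse_rank_list_alt nums := by
  rw [pvA_eq, pvS_length, pvRange_bridge, List.foldl_map]
  obtain ⟨-, hlen, hval⟩ := pvLoop_inv nums nums.length le_rfl
  apply List.ext_getElem
  · rw [hlen]; simp [reverse_rank_list_alt]
  intro p hp hp'
  have hpn : p < nums.length := by rwa [hlen] at hp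
  -- p is the first component of some sorted entry
  have hmem : ((p : Nat) : Int) ∈ (pvS nums).map (·.1) := by
    have hper := (pvS_perm nums).map (·.1)
    rw [PySem.List.map_fst_enumerate] at hper
    refine hper.mem_iff.mpr ?_
    rw [PySem.List.mem_pyRange_one]
    constructor
    · positivity
    · omega
  rcases List.mem_map.mp hmem with ⟨q, hq, hq1⟩
  rcases List.mem_iff_getElem.mp hq with ⟨i, hi, rfl⟩
  have hin : i < nums.length := by rwa [pvS_length] at hi
  have hvp : (pvV nums i).1 = (p : Int) := by rw [pvV_eq nums i hin]; exact hq1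
  obtain ⟨k, hk, hvk⟩ := pvV_spec nums i hin
  have hkp : k = p := by
    have := hvp
    rw [hvk] at this
    simp only [] at this
    exact_mod_cast this
  have hsnd : (pvV nums i).2 = nums[p] := by
    rw [hvk]
    simp [hkp]
  have hL := hval i hin
  rw [hvp] at hL
  rw [PySem.List.pyGetD_natCast] at hL
  rw [List.getD_eq_getElem _ _ hp] at hL
  rw [hL, pvW_target nums i hin, hsnd]
  simp [reverse_rank_list_alt]

-- ===== VERDICT (by name: the statement is the Claim_ definition above) =====
theorem reverse_rank_list_spec : Claim_equal_reverse_rank_list := by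
  intro nums _
  unfold Spec_reverse_rank_list
  exact pvMain nums
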